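-- pv_equiv track=rewrite | github.com/otiasiruy/cp | leetcode/3450.py | maxStudentsOnBench
-- ===== SOURCE A (Python) =====
-- from collections import defaultdict
-- from typing import List
--
-- def maxStudentsOnBench(students: List[List[int]]) -> int:
--     d = defaultdict(set)
--     for s in students:
--         d[s[1]].add(s[0])
--     ans = 0
--     for k, v in d.items():
--         ans = max(ans, len(v))
--     return ans
-- ===== SOURCE B (Python) =====
-- from typing import List
--
-- def maxStudentsOnBench(students: List[List[int]]) -> int:
--     pairs = sorted((s[1], s[0]) for s in students)
--     ans = 0
--     run = 0
--     prev = None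
--     for p in pairs:
--         if p == prev:
--             continue
--         run = run + 1 if prev is not None and p[0] == prev[0] else 1
--         prev = p
--         if run > ans:
--             ans = run
--     return ans
-- ===== Notes on version B (the rewrite author's own statement) =====
-- stated objective: alternative
-- what changed: Replaces A's hash grouping (defaultdict of per-bench student sets scanned for the largest) by sort-then-scan: sort the (bench, student) pairs lexicographically, then one linear scan that skips adjacent duplicate pairs and tracks the current bench-run length and the running maximum, with no sets or dicts at all.
import Mathlib
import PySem

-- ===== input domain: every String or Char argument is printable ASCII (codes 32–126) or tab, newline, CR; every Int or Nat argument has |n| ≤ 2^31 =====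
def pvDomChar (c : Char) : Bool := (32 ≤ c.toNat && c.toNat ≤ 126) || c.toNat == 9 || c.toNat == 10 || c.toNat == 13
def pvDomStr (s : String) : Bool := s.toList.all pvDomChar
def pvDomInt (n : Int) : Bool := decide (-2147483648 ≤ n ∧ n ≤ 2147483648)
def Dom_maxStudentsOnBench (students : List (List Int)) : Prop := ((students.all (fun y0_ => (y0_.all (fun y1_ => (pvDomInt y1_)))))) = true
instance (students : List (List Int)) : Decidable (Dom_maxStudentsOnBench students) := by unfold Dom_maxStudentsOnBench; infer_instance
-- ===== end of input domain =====

-- B replaces A's hash grouping (dict of per-bench sets, scanned for the max) by sort-then-scan: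
-- sort the (bench, student) pairs lexicographically, then one linear scan that skips adjacent
-- duplicate pairs and tracks the length of the current bench run and the running maximum.

-- ===== PORT A =====
-- for s in students: d[s[1]].add(s[0])   (defaultdict(set); s[0]/s[1] in range by Pre_)
def maxStudentsOnBenchLoopA (d : PySem.Dict Int (PySem.Set Int)) (s : List Int) :
    PySem.Dict Int (PySem.Set Int) :=
  d.modify (PySem.List.pyGetD s 1 0) PySem.Set.empty
    (fun v => PySem.Set.add v (PySem.List.pyGetD s 0 0))

def maxStudentsOnBench (students : List (List Int)) : Int :=
  let d := students.foldl maxStudentsOnBenchLoopA PySem.Dict.empty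
  -- ans = 0; for k, v in d.items(): ans = max(ans, len(v))
  d.items.foldl (fun ans kv => max ans (PySem.Set.len kv.2)) 0

-- ===== PORT B =====
-- (s[1], s[0])
def pvPairB (s : List Int) : Int × Int :=
  (PySem.List.pyGetD s 1 0, PySem.List.pyGetD s 0 0)

-- loop body; state = (ans, run, prev)
def pvStepB (st : Int × Int × Option (Int × Int)) (p : Int × Int) :
    Int × Int × Option (Int × Int) :=
  -- if p == prev: continue
  if st.2.2 = some p then st
  else
    -- run = run + 1 if prev is not None and p[0] == prev[0] else 1
    let run := match st.2.2 with
      | some q => if p.1 = q.1 then st.2.1 + 1 else 1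
      | none => 1
    -- prev = p; if run > ans: ans = run
    ((if st.1 < run then run else st.1), run, some p)

def maxStudentsOnBench_alt (students : List (List Int)) : Int :=
  -- pairs = sorted((s[1], s[0]) for s in students)   (Python tuple '<' is lexicographic = toLex)
  let pairs := PySem.List.sorted (students.map pvPairB) (fun p => toLex p)
  (pairs.foldl pvStepB (0, 0, none)).1

-- ===== PRECONDITION & SPEC =====
-- Python A evaluates s[1] and s[0] on every row: a row shorter than 2 raises IndexError (B raises too).
def Pre_maxStudentsOnBench (students : List (List Int)) : Prop :=
  ∀ s ∈ students, 2 ≤ s.length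
instance (students : List (List Int)) : Decidable (Pre_maxStudentsOnBench students) := by
  unfold Pre_maxStudentsOnBench; infer_instance

def pvWitness_maxStudentsOnBench : List (List Int) := [[1, 2], [3, 2], [1, 2], [4, 5]]

def Spec_maxStudentsOnBench (students : List (List Int)) (out : Int) : Prop := out = maxStudentsOnBench_alt students
instance (students : List (List Int)) (out : Int) : Decidable (Spec_maxStudentsOnBench students out) := by unfold Spec_maxStudentsOnBench; infer_instance

-- ===== CLAIM (what is proved, stated in full; the proofs are below) =====
def Claim_equal_maxStudentsOnBench : Prop := ∀ (students : List (List Int)), Dom_maxStudentsOnBench students → Pre_maxStudentsOnBench students → Spec_maxStudentsOnBench students (maxStudentsOnBench students)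

-- ===== LEMMAS AND PROOFS =====

-- number of distinct students on bench b among the (bench, student) pairs P
def pvCnt (P : List (Int × Int)) (b : Int) : Int :=
  ((P.toFinset.filter (fun p => p.1 = b)).card : Int)

-- r is the maximum over benches of the distinct-student count (0 when there is none)
def pvIsMax (P : List (Int × Int)) (r : Int) : Prop :=
  (∀ b, pvCnt P b ≤ r) ∧ (r = 0 ∨ ∃ b, r = pvCnt P b)

theorem pvCnt_nonneg (P : List (Int × Int)) (b : Int) : 0 ≤ pvCnt P b :=
  Int.natCast_nonneg _

theorem pvCnt_congr {P Q : List (Int × Int)} (h : P.toFinset = Q.toFinset) :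
    pvCnt P = pvCnt Q := by
  funext b; simp [pvCnt, h]

theorem pvCnt_nil (b : Int) : pvCnt [] b = 0 := by simp [pvCnt]

theorem pvCnt_append_self {P : List (Int × Int)} {p : Int × Int} (h : p ∉ P) :
    pvCnt (P ++ [p]) p.1 = pvCnt P p.1 + 1 := by
  have hset : (P ++ [p]).toFinset = insert p P.toFinset := by
    ext x; simp
  unfold pvCnt
  rw [hset, Finset.filter_insert, if_pos rfl, Finset.card_insert_of_notMem (by simp [h])]
  push_cast; ring

theorem pvCnt_append_ne {P : List (Int × Int)} {p : Int × Int} {b : Int} (h : b ≠ p.1) :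
    pvCnt (P ++ [p]) b = pvCnt P b := by
  have hset : (P ++ [p]).toFinset = insert p P.toFinset := by
    ext x; simp
  unfold pvCnt
  rw [hset, Finset.filter_insert, if_neg (fun hc => h hc.symm)]

theorem pvCnt_append_mem {P : List (Int × Int)} {p : Int × Int} (h : p ∈ P) :
    pvCnt (P ++ [p]) = pvCnt P := by
  apply pvCnt_congr
  simp [List.toFinset_append]
  exact h

theorem pvCnt_eq_zero {P : List (Int × Int)} {b : Int} (h : ∀ r ∈ P, r.1 ≠ b) :
    pvCnt P b = 0 := by
  simp only [pvCnt, Int.natCast_eq_zero, Finset.card_eq_zero, Finset.filter_eq_empty_iff]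
  intro p hp
  exact h p (List.mem_toFinset.mp hp)

theorem pvIsMax_nonneg {P : List (Int × Int)} {r : Int} (h : pvIsMax P r) : 0 ≤ r := by
  rcases h.2 with h0 | ⟨b, hb⟩
  · omega
  · exact hb ▸ pvCnt_nonneg P b

theorem pvIsMax_unique {P : List (Int × Int)} {r₁ r₂ : Int}
    (h₁ : pvIsMax P r₁) (h₂ : pvIsMax P r₂) : r₁ = r₂ := by
  have le : ∀ {a b : Int}, pvIsMax P a → pvIsMax P b → a ≤ b := by
    intro a b ha hb
    rcases ha.2 with h0 | ⟨c, hc⟩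
    · exact h0 ▸ pvIsMax_nonneg hb
    · exact hc ▸ hb.1 c
  exact le_antisymm (le h₁ h₂) (le h₂ h₁)

theorem pvIsMax_congr {P Q : List (Int × Int)} (h : P.toFinset = Q.toFinset) (r : Int) :
    pvIsMax P r ↔ pvIsMax Q r := by
  unfold pvIsMax
  rw [pvCnt_congr h]

-- a nodup set v listing exactly the students of bench b has length pvCnt P b
theorem pvLen_eq {v : List Int} {b : Int} {P : List (Int × Int)} (hnd : v.Nodup)
    (hm : ∀ a, a ∈ v ↔ (b, a) ∈ P) : (v.length : Int) = pvCnt P b := by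
  have himg : P.toFinset.filter (fun p => p.1 = b) = v.toFinset.image (fun a => (b, a)) := by
    ext ⟨x, y⟩
    simp only [Finset.mem_filter, List.mem_toFinset, Finset.mem_image]
    constructor
    · rintro ⟨hP, rfl⟩
      exact ⟨y, (hm y).mpr hP, rfl⟩
    · rintro ⟨a, ha, heq⟩
      obtain ⟨rfl, rfl⟩ := Prod.mk.injEq .. ▸ heq
      exact ⟨(hm a).mp ha, rfl⟩
  rw [pvCnt, himg, Finset.card_image_of_injective _ (fun a₁ a₂ h => by
      simpa using congrArg Prod.snd h), List.toFinset_card_of_nodup hnd]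

-- ---------- A side ----------

-- invariant of A's dict-building loop relative to the pair list seen so far
def pvInvA (d : PySem.Dict Int (PySem.Set Int)) (P : List (Int × Int)) : Prop :=
  (∀ b, (d.getD b PySem.Set.empty).Nodup) ∧
  (∀ b a, a ∈ d.getD b PySem.Set.empty ↔ (b, a) ∈ P) ∧
  (∀ b, d.contains b = true ↔ b ∈ P.map Prod.fst)

theorem pvStepA_inv {d : PySem.Dict Int (PySem.Set Int)} {P : List (Int × Int)}
    (s : List Int) (h : pvInvA d P) :
    pvInvA (maxStudentsOnBenchLoopA d s) (P ++ [pvPairB s]) := by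
  obtain ⟨hnd, hmem, hcon⟩ := h
  have hget : ∀ b, (maxStudentsOnBenchLoopA d s).getD b PySem.Set.empty =
      if b = PySem.List.pyGetD s 1 0 then
        PySem.Set.add (d.getD (PySem.List.pyGetD s 1 0) PySem.Set.empty)
          (PySem.List.pyGetD s 0 0)
      else d.getD b PySem.Set.empty :=
    fun b => PySem.Dict.getD_modify d _ b PySem.Set.empty _
  refine ⟨?_, ?_, ?_⟩
  · intro b
    rw [hget b]
    split_ifs with hb
    · exact PySem.Set.nodup_add _ _ (hnd _)
    · exact hnd b
  · intro b x
    rw [hget b]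
    split_ifs with hb
    · subst hb
      rw [PySem.Set.mem_add, hmem]
      simp [pvPairB, Prod.ext_iff]
    · simp only [hmem, List.mem_append, List.mem_singleton, pvPairB, Prod.ext_iff]
      constructor
      · exact Or.inl
      · rintro (hx | ⟨hb', -⟩)
        · exact hx
        · exact absurd hb' hb
  · intro b
    unfold maxStudentsOnBenchLoopA
    rw [PySem.Dict.contains_modify]
    simp [hcon, pvPairB, beq_iff_eq, or_comm]

theorem pvLoopA_inv (students : List (List Int)) (d : PySem.Dict Int (PySem.Set Int))
    (P : List (Int × Int)) (h : pvInvA d P) :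
    pvInvA (students.foldl maxStudentsOnBenchLoopA d) (P ++ students.map pvPairB) := by
  induction students generalizing d P with
  | nil => simpa using h
  | cons s t ih =>
    have := ih (maxStudentsOnBenchLoopA d s) (P ++ [pvPairB s]) (pvStepA_inv s h)
    simpa [List.append_assoc] using this

theorem pvA_isMax (students : List (List Int)) :
    pvIsMax (students.map pvPairB) (maxStudentsOnBench students) := by
  have h0 : pvInvA PySem.Dict.empty [] := by
    refine ⟨fun b => ?_, fun b a => ?_, fun b => ?_⟩ <;>
      simp [PySem.Dict.getD_empty, PySem.Set.empty, PySem.Dict.contains_empty]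
  have hInv : pvInvA (students.foldl maxStudentsOnBenchLoopA PySem.Dict.empty)
      (students.map pvPairB) := by
    have := pvLoopA_inv students PySem.Dict.empty [] h0
    simpa using this
  set d := students.foldl maxStudentsOnBenchLoopA PySem.Dict.empty with hd
  set P := students.map pvPairB with hP
  obtain ⟨hnd, hmem, hcon⟩ := hInv
  have hkeys : d.keys.Nodup := by
    rw [hd]
    exact PySem.Dict.nodup_keys_foldl_modify_key students (fun s => PySem.List.pyGetD s 1 0)
      PySem.Set.empty (fun _ s => fun v => PySem.Set.add v (PySem.List.pyGetD s 0 0))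
      PySem.Dict.empty (by simp [PySem.Dict.keys_empty])
  have hval : ∀ b v, d.get? b = some v → PySem.Set.len v = pvCnt P b := by
    intro b v hv
    have hgd : d.getD b PySem.Set.empty = v := PySem.Dict.getD_of_get?_eq_some d _ hv
    have : (v.length : Int) = pvCnt P b :=
      pvLen_eq (hgd ▸ hnd b) (fun a => hgd ▸ hmem b a)
    simpa [PySem.Set.len, PySem.List.len_eq] using this
  have hub := PySem.List.le_foldl_max_int d.items (fun kv => PySem.Set.len kv.2) 0
  show pvIsMax P (d.items.foldl (fun ans kv => max ans (PySem.Set.len kv.2)) 0)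
  constructor
  · intro b
    by_cases hb : b ∈ P.map Prod.fst
    · have hc : d.contains b = true := (hcon b).mpr hb
      rw [PySem.Dict.contains_eq_isSome_get?] at hc
      obtain ⟨v, hv⟩ := Option.isSome_iff_exists.mp hc
      have := hub.2 (b, v) (PySem.Dict.mem_items_of_get?_eq_some d hv)
      rw [← hval b v hv]
      exact this
    · have hz : pvCnt P b = 0 := pvCnt_eq_zero (by
        intro p hp hfst
        exact hb (hfst ▸ List.mem_map_of_mem hp))
      rw [hz]
      exact hub.1
  · have hform : d.items.foldl (fun ans kv => max ans (PySem.Set.len kv.2)) 0 =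
        (d.items.map (fun kv => PySem.Set.len kv.2)).foldl max 0 := by
      rw [List.foldl_map]
    rcases PySem.List.foldl_max_mem (d.items.map (fun kv => PySem.Set.len kv.2)) 0 with
      h0' | hmem'
    · exact Or.inl (by rw [hform, h0'])
    · obtain ⟨⟨b, v⟩, hbv, heq⟩ := List.mem_map.mp hmem'
      refine Or.inr ⟨b, ?_⟩
      rw [hform, ← heq, hval b v (PySem.Dict.get?_of_mem_items d hbv hkeys)]

-- ---------- B side ------------ ---------- B side ----------

-- invariant of B's scan: done = processed prefix of the sorted pair list
def pvInvB (done : List (Int × Int)) (st : Int × Int × Option (Int × Int)) : Prop :=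
  match st.2.2 with
  | none => done = [] ∧ st.1 = 0
  | some q => q ∈ done ∧ (∀ r ∈ done, toLex r ≤ toLex q) ∧
      st.2.1 = pvCnt done q.1 ∧ pvIsMax done st.1

theorem pvStepB_none (ans run : Int) (p : Int × Int) :
    pvStepB (ans, run, none) p = ((if ans < 1 then 1 else ans), 1, some p) := by
  simp [pvStepB]

theorem pvStepB_skip (ans run : Int) (q p : Int × Int) (h : q = p) :
    pvStepB (ans, run, some q) p = (ans, run, some q) := by
  simp [pvStepB, h]

theorem pvStepB_same (ans run : Int) (q p : Int × Int) (h : q ≠ p) (hf : p.1 = q.1) :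
    pvStepB (ans, run, some q) p =
      ((if ans < run + 1 then run + 1 else ans), run + 1, some p) := by
  simp [pvStepB, (by simpa using h : ¬ (some q = some p)), hf]

theorem pvStepB_new (ans run : Int) (q p : Int × Int) (h : q ≠ p) (hf : p.1 ≠ q.1) :
    pvStepB (ans, run, some q) p = ((if ans < 1 then 1 else ans), 1, some p) := by
  simp [pvStepB, (by simpa using h : ¬ (some q = some p)), hf]

theorem pvStepB_inv {done : List (Int × Int)} {st : Int × Int × Option (Int × Int)}
    {p : Int × Int} (hord : ∀ r ∈ done, toLex r ≤ toLex p) (h : pvInvB done st) :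
    pvInvB (done ++ [p]) (pvStepB st p) := by
  obtain ⟨ans, run, prev⟩ := st
  match prev with
  | none =>
    obtain ⟨rfl, rfl⟩ : done = [] ∧ ans = 0 := h
    rw [pvStepB_none]
    have h1 : pvCnt ([] ++ [p]) p.1 = 1 := by
      rw [pvCnt_append_self (by simp), pvCnt_nil]
      omega
    refine ⟨List.mem_append_right _ (List.mem_singleton_self p), fun r hr => ?_,
      h1.symm, ?_, ?_⟩
    · simp only [List.nil_append, List.mem_singleton] at hr
      rw [hr]
    · intro b
      by_cases hb : b = p.1
      · subst hb
        rw [h1]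
        split_ifs <;> omega
      · rw [pvCnt_append_ne hb, pvCnt_nil]
        split_ifs <;> omega
    · split_ifs
      · exact Or.inr ⟨p.1, h1.symm⟩
      · omega
  | some q =>
    obtain ⟨hqmem, hqmax, hrun, hmax⟩ :
        q ∈ done ∧ (∀ r ∈ done, toLex r ≤ toLex q) ∧ run = pvCnt done q.1 ∧ pvIsMax done ans := h
    by_cases hpq : q = p
    · -- duplicate pair: skipped
      have hcnt : pvCnt (done ++ [p]) = pvCnt done := pvCnt_append_mem (hpq ▸ hqmem)
      rw [pvStepB_skip _ _ _ _ hpq]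
      refine ⟨List.mem_append_left _ hqmem, fun r hr => ?_, by rw [hcnt]; exact hrun, ?_⟩
      · rcases List.mem_append.mp hr with hr | hr
        · exact hqmax r hr
        · rw [List.mem_singleton.mp hr, ← hpq]
      · unfold pvIsMax at hmax ⊢
        rw [hcnt]
        exact hmax
    · have hqp : toLex q ≤ toLex p := hord q hqmem
      have hpnot : p ∉ done := fun hp =>
        hpq (toLex.injective (le_antisymm hqp (hqmax p hp)))
      by_cases hfst : p.1 = q.1
      · -- same bench: the run extends
        have hrunp : run = pvCnt done p.1 := by rw [hrun, hfst]
        have hcnt : pvCnt (done ++ [p]) p.1 = pvCnt done p.1 + 1 := pvCnt_append_self hpnot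
        rw [pvStepB_same _ _ _ _ hpq hfst]
        refine ⟨List.mem_append_right _ (List.mem_singleton_self p), fun r hr => ?_, ?_, ?_⟩
        · rcases List.mem_append.mp hr with hr | hr
          · exact hord r hr
          · rw [List.mem_singleton.mp hr]
        · rw [hcnt, ← hrunp]
        · obtain ⟨hb, hat⟩ := hmax
          constructor
          · intro b
            by_cases hbp : b = p.1
            · subst hbp
              rw [hcnt, ← hrunp]
              split_ifs <;> omega
            · rw [pvCnt_append_ne hbp]
              have := hb b
              split_ifs <;> omega
          · split_ifs with hlt
            · exact Or.inr ⟨p.1, by rw [hcnt, ← hrunp]⟩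
            · rcases hat with h0 | ⟨b, hbv⟩
              · have := pvCnt_nonneg done p.1
                omega
              · by_cases hbp : b = p.1
                · subst hbp
                  omega
                · exact Or.inr ⟨b, by rw [pvCnt_append_ne hbp]; exact hbv⟩
      · -- new bench: every earlier pair has a strictly smaller bench id
        have hql : q.1 < p.1 := by
          rcases Prod.Lex.le_iff.mp hqp with hlt | ⟨heq, -⟩
          · exact hlt
          · exact absurd (show q.1 = p.1 from heq) (fun hx => hfst hx.symm)
        have hsmall : ∀ r ∈ done, r.1 ≠ p.1 := by
          intro r hr
          rcases Prod.Lex.le_iff.mp (hqmax r hr) with hlt | ⟨heq, -⟩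
          · have h1 : r.1 < q.1 := hlt
            omega
          · have h1 : r.1 = q.1 := heq
            omega
        have hz : pvCnt done p.1 = 0 := pvCnt_eq_zero hsmall
        have hcnt : pvCnt (done ++ [p]) p.1 = 1 := by
          rw [pvCnt_append_self hpnot, hz]
          omega
        rw [pvStepB_new _ _ _ _ hpq hfst]
        refine ⟨List.mem_append_right _ (List.mem_singleton_self p), fun r hr => ?_,
          hcnt.symm, ?_⟩
        · rcases List.mem_append.mp hr with hr | hr
          · exact hord r hr
          · rw [List.mem_singleton.mp hr]
        · obtain ⟨hb, hat⟩ := hmax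
          constructor
          · intro b
            by_cases hbp : b = p.1
            · subst hbp
              rw [hcnt]
              split_ifs <;> omega
            · rw [pvCnt_append_ne hbp]
              have := hb b
              split_ifs <;> omega
          · split_ifs with hlt
            · exact Or.inr ⟨p.1, hcnt.symm⟩
            · rcases hat with h0 | ⟨b, hbv⟩
              · omega
              · by_cases hbp : b = p.1
                · subst hbp
                  omega
                · exact Or.inr ⟨b, by rw [pvCnt_append_ne hbp]; exact hbv⟩

theorem pvLoopB_inv (todo done : List (Int × Int)) (st : Int × Int × Option (Int × Int))
    (hpw : (done ++ todo).Pairwise (fun a b => toLex a ≤ toLex b)) (h : pvInvB done st) :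
    pvInvB (done ++ todo) (todo.foldl pvStepB st) := by
  induction todo generalizing done st with
  | nil => simpa using h
  | cons p t ih =>
    have hshape : done ++ p :: t = (done ++ [p]) ++ t := by simp
    have hord : ∀ r ∈ done, toLex r ≤ toLex p := by
      intro r hr
      exact (List.pairwise_append.mp hpw).2.2 r hr p (List.mem_cons_self)
    have hpw' : ((done ++ [p]) ++ t).Pairwise (fun a b => toLex a ≤ toLex b) := by
      rw [← hshape]; exact hpw
    rw [List.foldl_cons, hshape]
    exact ih (done ++ [p]) (pvStepB st p) hpw' (pvStepB_inv hord h)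

theorem pvB_main (S : List (Int × Int))
    (hpw : S.Pairwise (fun a b => toLex a ≤ toLex b)) :
    pvIsMax S ((S.foldl pvStepB (0, 0, none)).1) := by
  have hInv : pvInvB S (S.foldl pvStepB (0, 0, none)) := by
    have := pvLoopB_inv S [] (0, 0, none) (by simpa using hpw) ⟨rfl, rfl⟩
    simpa using this
  cases hmatch : (S.foldl pvStepB (0, 0, none)).2.2 with
  | none =>
    unfold pvInvB at hInv
    rw [hmatch] at hInv
    obtain ⟨hSe, hans⟩ := hInv
    subst hSe
    rw [hans]
    exact ⟨fun b => le_of_eq (pvCnt_nil b), Or.inl rfl⟩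
  | some q =>
    unfold pvInvB at hInv
    rw [hmatch] at hInv
    exact hInv.2.2.2

theorem pvB_isMax (students : List (List Int)) :
    pvIsMax (students.map pvPairB) (maxStudentsOnBench_alt students) := by
  have h := pvB_main (PySem.List.sorted (students.map pvPairB) (fun p => toLex p))
    (PySem.List.sorted_pairwise (students.map pvPairB) (fun p => toLex p))
  have hperm := PySem.List.sorted_perm (students.map pvPairB) (fun p => toLex p) false
  have hfin : (PySem.List.sorted (students.map pvPairB) (fun p => toLex p)).toFinset =
      (students.map pvPairB).toFinset := by
    ext x
    simp [List.mem_toFinset, hperm.mem_iff]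
  rw [pvIsMax_congr hfin] at h
  exact h

-- ===== VERDICT (by name: the statement is the Claim_ definition above) =====
theorem maxStudentsOnBench_spec : Claim_equal_maxStudentsOnBench := by
  intro students _ _
  unfold Spec_maxStudentsOnBench
  exact pvIsMax_unique (pvA_isMax students) (pvB_isMax students)
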